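-- pv_equiv track=rewrite | github.com/PigeonHawk/foxy-bot | foxy_bot.py | draw_platform
-- ===== SOURCE A (Python) =====
-- TOTAL_SLOTS = 7
--
-- CENTER = 3
--
-- def draw_platform(p1pos, p2pos):
--     slots = []
--     for i in range(TOTAL_SLOTS):
--         if i == p1pos and i == p2pos:
--             slots.append("[P1P2]")
--         elif i == p1pos:
--             slots.append("[ P1 ]")
--         elif i == p2pos:
--             slots.append("[ P2 ]")
--         elif i == 0 or i == TOTAL_SLOTS - 1:
--             slots.append("[EDGE]")
--         elif i == CENTER:
--             slots.append("[MID ]")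
--         else:
--             slots.append("[    ]")
--     platform = "".join(slots)
--     return f"```\n~~~{platform}~~~\n```"
-- ===== SOURCE B (Python) =====
-- TOTAL_SLOTS = 7
--
-- CENTER = 3
--
-- def draw_platform(p1pos, p2pos):
--     slots = ["[EDGE]", "[    ]", "[    ]", "[MID ]", "[    ]", "[    ]", "[EDGE]"]
--     if p1pos == p2pos:
--         if 0 <= p1pos < TOTAL_SLOTS:
--             slots[p1pos] = "[P1P2]"
--     else:
--         if 0 <= p1pos < TOTAL_SLOTS:
--             slots[p1pos] = "[ P1 ]"
--         if 0 <= p2pos < TOTAL_SLOTS: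
--             slots[p2pos] = "[ P2 ]"
--     platform = "".join(slots)
--     return f"```\n~~~{platform}~~~\n```"
-- ===== Notes on version B (the rewrite author's own statement) =====
-- stated objective: simpler
-- what changed: B keeps the static 7-slot board as a literal list and overlays player markers by direct index assignment (guarded by range checks), instead of re-deciding every slot's content inside a loop over all slots.
import Mathlib
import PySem

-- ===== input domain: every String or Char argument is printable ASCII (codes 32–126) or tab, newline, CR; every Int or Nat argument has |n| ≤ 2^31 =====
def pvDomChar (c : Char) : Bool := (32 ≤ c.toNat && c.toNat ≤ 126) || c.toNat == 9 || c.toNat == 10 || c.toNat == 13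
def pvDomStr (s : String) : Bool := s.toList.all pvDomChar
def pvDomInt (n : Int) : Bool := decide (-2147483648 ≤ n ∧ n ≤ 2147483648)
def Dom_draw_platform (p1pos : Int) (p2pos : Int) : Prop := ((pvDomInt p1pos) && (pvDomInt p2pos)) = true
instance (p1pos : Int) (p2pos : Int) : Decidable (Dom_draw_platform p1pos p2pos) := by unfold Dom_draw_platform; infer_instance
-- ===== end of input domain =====

-- B keeps the static board as a literal 7-slot list and overlays player markers by guarded index assignment (simpler decomposition, not faster).

-- ===== PORT A =====
def draw_platform (p1pos : Int) (p2pos : Int) : String :=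
  "```\n~~~" ++ PySem.Str.join "" ((PySem.List.pyRange 0 7 1).foldl (fun acc i =>
    if i = p1pos ∧ i = p2pos then acc ++ ["[P1P2]"]
    else if i = p1pos then acc ++ ["[ P1 ]"]
    else if i = p2pos then acc ++ ["[ P2 ]"]
    else if i = 0 ∨ i = 7 - 1 then acc ++ ["[EDGE]"]
    else if i = 3 then acc ++ ["[MID ]"]
    else acc ++ ["[    ]"]) []) ++ "~~~\n```"

-- ===== PORT B =====
def draw_platform_alt (p1pos : Int) (p2pos : Int) : String :=
  let base : List String := ["[EDGE]", "[    ]", "[    ]", "[MID ]", "[    ]", "[    ]", "[EDGE]"]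
  let slots : List String :=
    if p1pos = p2pos then
      if 0 ≤ p1pos ∧ p1pos < 7 then base.set p1pos.toNat "[P1P2]" else base
    else
      let s1 := if 0 ≤ p1pos ∧ p1pos < 7 then base.set p1pos.toNat "[ P1 ]" else base
      if 0 ≤ p2pos ∧ p2pos < 7 then s1.set p2pos.toNat "[ P2 ]" else s1
  let platform := PySem.Str.join "" slots
  "```\n~~~" ++ platform ++ "~~~\n```"

-- ===== PRECONDITION & SPEC =====
def Spec_draw_platform (p1pos : Int) (p2pos : Int) (out : String) : Prop := out = draw_platform_alt p1pos p2pos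
instance (p1pos : Int) (p2pos : Int) (out : String) : Decidable (Spec_draw_platform p1pos p2pos out) := by unfold Spec_draw_platform; infer_instance

-- ===== CLAIM (what is proved, stated in full; the proofs are below) =====
def Claim_equal_draw_platform : Prop := ∀ (p1pos : Int) (p2pos : Int), Dom_draw_platform p1pos p2pos → Spec_draw_platform p1pos p2pos (draw_platform p1pos p2pos)

-- ===== LEMMAS AND PROOFS =====

-- Normalize an out-of-range position to the sentinel -1: no slot index 0..6 equals it,
-- so both ports are invariant under this replacement.
def pvNorm (p : Int) : Int := if 0 ≤ p ∧ p < 7 then p else -1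

lemma draw_platform_norm (p1 p2 : Int) :
    draw_platform p1 p2 = draw_platform (pvNorm p1) (pvNorm p2) := by
  unfold draw_platform
  have hcongr : ∀ (acc : List String) (i : Int), i ∈ PySem.List.pyRange 0 7 1 →
      (if i = p1 ∧ i = p2 then acc ++ ["[P1P2]"]
       else if i = p1 then acc ++ ["[ P1 ]"]
       else if i = p2 then acc ++ ["[ P2 ]"]
       else if i = 0 ∨ i = 7 - 1 then acc ++ ["[EDGE]"]
       else if i = 3 then acc ++ ["[MID ]"]
       else acc ++ ["[    ]"]) =
      (if i = pvNorm p1 ∧ i = pvNorm p2 then acc ++ ["[P1P2]"]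
       else if i = pvNorm p1 then acc ++ ["[ P1 ]"]
       else if i = pvNorm p2 then acc ++ ["[ P2 ]"]
       else if i = 0 ∨ i = 7 - 1 then acc ++ ["[EDGE]"]
       else if i = 3 then acc ++ ["[MID ]"]
       else acc ++ ["[    ]"]) := by
    intro acc i hi
    rw [PySem.List.mem_pyRange_one] at hi
    unfold pvNorm
    split_ifs <;> first | rfl | omega
  exact congrArg (fun s => "```\n~~~" ++ PySem.Str.join "" s ++ "~~~\n```")
    (PySem.List.foldl_congr_mem _ _ _ _ hcongr)

lemma draw_platform_alt_norm (p1 p2 : Int) :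
    draw_platform_alt p1 p2 = draw_platform_alt (pvNorm p1) (pvNorm p2) := by
  simp only [draw_platform_alt, pvNorm]
  split_ifs <;> first | omega | rfl

lemma pvNorm_cases (p : Int) :
    pvNorm p = -1 ∨ pvNorm p = 0 ∨ pvNorm p = 1 ∨ pvNorm p = 2 ∨ pvNorm p = 3 ∨
    pvNorm p = 4 ∨ pvNorm p = 5 ∨ pvNorm p = 6 := by
  unfold pvNorm; split_ifs with h <;> omega

lemma draw_platform_eq_alt_small (q1 q2 : Int)
    (h1 : q1 = -1 ∨ q1 = 0 ∨ q1 = 1 ∨ q1 = 2 ∨ q1 = 3 ∨ q1 = 4 ∨ q1 = 5 ∨ q1 = 6)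
    (h2 : q2 = -1 ∨ q2 = 0 ∨ q2 = 1 ∨ q2 = 2 ∨ q2 = 3 ∨ q2 = 4 ∨ q2 = 5 ∨ q2 = 6) :
    draw_platform q1 q2 = draw_platform_alt q1 q2 := by
  rcases h1 with h | h | h | h | h | h | h | h <;> subst h <;>
    rcases h2 with h | h | h | h | h | h | h | h <;> subst h <;> decide

-- ===== VERDICT (by name: the statement is the Claim_ definition above) =====
theorem draw_platform_spec : Claim_equal_draw_platform := by
  intro p1 p2 _
  unfold Spec_draw_platform
  rw [draw_platform_norm, draw_platform_alt_norm]
  exact draw_platform_eq_alt_small _ _ (pvNorm_cases p1) (pvNorm_cases p2)
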